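-- pv_equiv track=rewrite | github.com/star0418-abc/gromacs1 | pipeline/provenance.py | _extract_version_summary
-- ===== SOURCE A (Python) =====
-- from typing import Any, Dict, List, Optional, TYPE_CHECKING
--
-- def _extract_version_summary(tool_name: str, probe: Dict[str, Any]) -> str:
--     status = str(probe.get("status") or "")
--     if status == "not_found":
--         return "not found"
--     if status not in {"ok", "error"}:
--         return "detection failed"
--     stdout = str(probe.get("stdout") or "")
--     stderr = str(probe.get("stderr") or "")
--     combined_lines = [line.strip() for line in f"{stdout}\n{stderr}".splitlines() if line.strip()]
--
--     if tool_name == "gromacs":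
--         for line in combined_lines:
--             if "GROMACS version" in line:
--                 return line.split(":", 1)[-1].strip() or line
--         for line in combined_lines:
--             if line.lower().startswith("gromacs"):
--                 return line
--     elif tool_name == "packmol":
--         for line in combined_lines:
--             upper = line.upper()
--             if "PACKMOL" in upper and "VERSION" in upper:
--                 return line
--     elif tool_name == "htpolynet":
--         if combined_lines:
--             return combined_lines[0]
--
--     if status == "error":
--         return "detection failed"
--     return "detected (version unknown)"
-- ===== SOURCE B (Python) =====
-- def _extract_version_summary(tool_name: str, probe) -> str:
--     status = str(probe.get("status") or "")
--     if status == "not_found":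
--         return "not found"
--     if status not in ("ok", "error"):
--         return "detection failed"
--     text = str(probe.get("stdout") or "") + "\n" + str(probe.get("stderr") or "")
--     lines = [ln.strip() for ln in text.splitlines() if ln.strip()]
--     default = "detection failed" if status == "error" else "detected (version unknown)"
--     if tool_name == "gromacs":
--         fallback = None
--         for line in lines:
--             if "GROMACS version" in line:
--                 return line.split(":", 1)[-1].strip() or line
--             if fallback is None and line.lower().startswith("gromacs"):
--                 fallback = line
--         return fallback if fallback is not None else default
--     if tool_name == "packmol":
--         return next(
--             (l for l in lines if "PACKMOL" in l.upper() and "VERSION" in l.upper()),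
--             default,
--         )
--     if tool_name == "htpolynet":
--         return lines[0] if lines else default
--     return default
-- ===== Notes on version B (the rewrite author's own statement) =====
-- stated objective: simpler
-- what changed: The gromacs branch's two sequential scans are fused into a single pass that short-circuits on 'GROMACS version' while recording the first 'gromacs'-prefixed line as a fallback; the packmol and htpolynet branches become single expressions (next(...) / head-or-default) over a precomputed default, removing the trailing status re-check.
import Mathlib
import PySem

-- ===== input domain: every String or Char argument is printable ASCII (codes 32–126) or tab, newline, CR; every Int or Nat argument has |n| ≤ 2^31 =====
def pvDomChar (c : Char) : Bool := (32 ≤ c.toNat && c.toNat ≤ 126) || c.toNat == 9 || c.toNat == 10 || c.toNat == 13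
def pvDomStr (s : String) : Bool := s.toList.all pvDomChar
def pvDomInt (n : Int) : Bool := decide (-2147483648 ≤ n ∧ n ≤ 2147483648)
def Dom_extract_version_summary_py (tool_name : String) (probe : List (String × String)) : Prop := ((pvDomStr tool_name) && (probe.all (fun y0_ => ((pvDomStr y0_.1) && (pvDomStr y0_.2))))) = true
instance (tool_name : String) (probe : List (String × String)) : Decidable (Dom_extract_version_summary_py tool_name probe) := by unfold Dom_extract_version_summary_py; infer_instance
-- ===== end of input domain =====

-- B fuses the gromacs branch's two scans into one short-circuiting pass with a first-match
-- fallback and turns the packmol/htpolynet branches into single expressions over a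
-- precomputed default (objective: simpler); return values agree with A everywhere.

-- ===== PORT A =====
-- shared by both ports: status/stdout/stderr lookup 'str(probe.get(k) or "")' and the
-- combined_lines comprehension, which A and B compute by the same Python code
def pvGetS (probe : List (String × String)) (k : String) : String :=
  PySem.Dict.getD ⟨probe⟩ k ""

def pvLines (stdout stderr : String) : List (List Char) :=
  ((PySem.Chars.splitlines (stdout.toList ++ '\n' :: stderr.toList)).filter
    (fun l => PySem.Chars.strip l ≠ [])).map PySem.Chars.strip

-- line.split(":", 1)[-1].strip() or line
def pvSplitLast (line : List Char) : List Char :=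
  let s := PySem.Chars.strip ((PySem.List.pyGet? (PySem.Chars.splitOnMax line [':'] 1) (-1)).getD [])
  if s = [] then line else s

-- A's first gromacs loop
def pvA_loop1 : List (List Char) → Option (List Char)
  | [] => none
  | l :: rest =>
    if PySem.Chars.isIn "GROMACS version".toList l then some (pvSplitLast l) else pvA_loop1 rest

-- A's second gromacs loop
def pvA_loop2 : List (List Char) → Option (List Char)
  | [] => none
  | l :: rest =>
    if PySem.Chars.startswith (PySem.Chars.lower l) "gromacs".toList then some l else pvA_loop2 rest

-- A's packmol loop
def pvA_loopP : List (List Char) → Option (List Char)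
  | [] => none
  | l :: rest =>
    let u := PySem.Chars.upper l
    if PySem.Chars.isIn "PACKMOL".toList u && PySem.Chars.isIn "VERSION".toList u then some l
    else pvA_loopP rest

def extract_version_summary_py (tool_name : String) (probe : List (String × String)) : String :=
  let status := pvGetS probe "status"
  if status = "not_found" then "not found"
  else if ¬ (status = "ok" ∨ status = "error") then "detection failed"
  else
    let lines := pvLines (pvGetS probe "stdout") (pvGetS probe "stderr")
    let found : Option (List Char) :=
      if tool_name = "gromacs" then
        match pvA_loop1 lines with
        | some v => some v
        | none => pvA_loop2 lines
      else if tool_name = "packmol" then pvA_loopP lines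
      else if tool_name = "htpolynet" then lines.head?
      else none
    match found with
    | some v => String.ofList v
    | none => if status = "error" then "detection failed" else "detected (version unknown)"

-- ===== PORT B =====
-- B's single fused gromacs pass: short-circuit on "GROMACS version", remember the first
-- "gromacs"-prefixed line as fallback, return the fallback (if any) after the loop
def pvB_loopG : List (List Char) → Option (List Char) → Option (List Char)
  | [], fb => fb
  | l :: rest, fb =>
    if PySem.Chars.isIn "GROMACS version".toList l then some (pvSplitLast l)
    else pvB_loopG rest
      (if fb = none ∧ PySem.Chars.startswith (PySem.Chars.lower l) "gromacs".toList then some l else fb)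

def extract_version_summary_py_alt (tool_name : String) (probe : List (String × String)) : String :=
  let status := pvGetS probe "status"
  if status = "not_found" then "not found"
  else if ¬ (status = "ok" ∨ status = "error") then "detection failed"
  else
    let lines := pvLines (pvGetS probe "stdout") (pvGetS probe "stderr")
    let dflt : String := if status = "error" then "detection failed" else "detected (version unknown)"
    if tool_name = "gromacs" then
      match pvB_loopG lines none with
      | some v => String.ofList v
      | none => dflt
    else if tool_name = "packmol" then
      match lines.find? (fun l =>
          let u := PySem.Chars.upper l
          PySem.Chars.isIn "PACKMOL".toList u && PySem.Chars.isIn "VERSION".toList u) with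
      | some l => String.ofList l
      | none => dflt
    else if tool_name = "htpolynet" then
      match lines.head? with
      | some l => String.ofList l
      | none => dflt
    else dflt

-- ===== PRECONDITION & SPEC =====
def Spec_extract_version_summary_py (tool_name : String) (probe : List (String × String)) (out : String) : Prop := out = extract_version_summary_py_alt tool_name probe
instance (tool_name : String) (probe : List (String × String)) (out : String) : Decidable (Spec_extract_version_summary_py tool_name probe out) := by unfold Spec_extract_version_summary_py; infer_instance

-- ===== CLAIM (what is proved, stated in full; the proofs are below) =====
def Claim_equal_extract_version_summary_py : Prop := ∀ (tool_name : String) (probe : List (String × String)), Dom_extract_version_summary_py tool_name probe → Spec_extract_version_summary_py tool_name probe (extract_version_summary_py tool_name probe)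

-- ===== LEMMAS AND PROOFS =====

-- B's fused pass equals: A's first loop, else the carried fallback, else A's second loop
theorem pvB_loopG_eq (lines : List (List Char)) (fb : Option (List Char)) :
    pvB_loopG lines fb =
      match pvA_loop1 lines with
      | some v => some v
      | none => match fb with
        | some v => some v
        | none => pvA_loop2 lines := by
  induction lines generalizing fb with
  | nil => cases fb <;> simp [pvB_loopG, pvA_loop1, pvA_loop2]
  | cons l rest ih =>
    rw [pvB_loopG, pvA_loop1, pvA_loop2]
    cases hv : PySem.Chars.isIn "GROMACS version".toList l with
    | true => simp
    | false =>
      simp only [Bool.false_eq_true, if_false, ih]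
      cases fb with
      | some v => simp
      | none =>
        cases hs : PySem.Chars.startswith (PySem.Chars.lower l) "gromacs".toList <;>
          simp

-- A's packmol loop is find?
theorem pvA_loopP_eq (lines : List (List Char)) :
    pvA_loopP lines = lines.find? (fun l =>
      let u := PySem.Chars.upper l
      PySem.Chars.isIn "PACKMOL".toList u && PySem.Chars.isIn "VERSION".toList u) := by
  induction lines with
  | nil => simp [pvA_loopP]
  | cons l rest ih =>
    rw [pvA_loopP, List.find?]
    cases h : (PySem.Chars.isIn "PACKMOL".toList (PySem.Chars.upper l) &&
        PySem.Chars.isIn "VERSION".toList (PySem.Chars.upper l)) <;> simp [ih]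

-- ===== VERDICT (by name: the statement is the Claim_ definition above) =====
theorem extract_version_summary_py_spec : Claim_equal_extract_version_summary_py := by
  intro tool_name probe _
  unfold Spec_extract_version_summary_py
  unfold extract_version_summary_py extract_version_summary_py_alt
  by_cases h1 : pvGetS probe "status" = "not_found"
  · simp [h1]
  · simp only [h1, if_false]
    by_cases h2 : pvGetS probe "status" = "ok" ∨ pvGetS probe "status" = "error"
    · simp only [h2, not_true, if_false]
      by_cases hg : tool_name = "gromacs"
      · simp only [hg, if_pos, pvB_loopG_eq]
      · simp only [hg, if_false]
        by_cases hp : tool_name = "packmol"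
        · simp only [hp, if_pos, ← pvA_loopP_eq]
        · simp only [hp, if_false]
          by_cases hh : tool_name = "htpolynet"
          · simp only [hh, if_pos]
          · simp [hh]
    · simp [h2]
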